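-- pv_equiv track=rewrite | github.com/tanmayBeginsJourney/talking-bird | backend/app/services/grounding_validator.py | check_for_speculation
-- ===== SOURCE A (Python) =====
-- def check_for_speculation(answer: str) -> bool:
--     """Check if answer contains speculative language."""
--     speculative_phrases = [
--         "generally",
--         "typically",
--         "probably",
--         "might",
--         "could be",
--         "I think",
--         "based on my knowledge",
--     ]
--     answer_lower = answer.lower()
--     return any(phrase in answer_lower for phrase in speculative_phrases)
-- ===== SOURCE B (Python) =====
-- _PHRASES = (
--     "generally",
--     "typically",
--     "probably",
--     "might",
--     "could be",
--     "i think",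
--     "based on my knowledge",
-- )
--
--
-- def check_for_speculation(answer: str) -> bool:
--     """Single left-to-right scan: at each position of the lowercased text,
--     test whether any speculative phrase starts there."""
--     s = answer.lower()
--     for i in range(len(s)):
--         if any(s.startswith(p, i) for p in _PHRASES):
--             return True
--     return False
-- ===== Notes on version B (the rewrite author's own statement) =====
-- stated objective: alternative
-- what changed: Replaces seven independent substring scans ('phrase in s' per phrase) by one left-to-right scan over the lowercased text that tests at each position whether any phrase starts there, and uses the lowercased phrase 'i think' so that clause can actually match.
-- intended difference: On answers whose lowercased text contains 'i think' but none of the other six phrases, A returns False (it tests the never-matching mixed-case 'I think' against the lowercased text) while B returns True, which is the intended detection of first-person speculation. — e.g. on check_for_speculation("I think so"): A returns false, B returns true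
import Mathlib
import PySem

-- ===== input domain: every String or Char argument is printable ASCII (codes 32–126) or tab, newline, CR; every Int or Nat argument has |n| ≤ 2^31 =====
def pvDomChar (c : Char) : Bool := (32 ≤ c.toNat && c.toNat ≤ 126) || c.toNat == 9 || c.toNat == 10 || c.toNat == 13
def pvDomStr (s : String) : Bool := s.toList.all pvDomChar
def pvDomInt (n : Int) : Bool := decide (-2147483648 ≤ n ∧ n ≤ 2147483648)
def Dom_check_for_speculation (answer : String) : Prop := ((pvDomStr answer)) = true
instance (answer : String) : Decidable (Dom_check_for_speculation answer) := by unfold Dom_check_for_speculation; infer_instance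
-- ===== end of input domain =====

-- B scans the lowercased text once, testing at each position whether a phrase starts there
-- (instead of seven independent 'phrase in s' scans), and uses the lowercased phrase
-- "i think" where A's mixed-case "I think" can never match (see D_ below).

-- ===== PORT A =====
def speculative_phrases : List String :=
  ["generally", "typically", "probably", "might", "could be", "I think",
   "based on my knowledge"]

def check_for_speculation (answer : String) : Bool :=
  let answer_lower := PySem.Str.lower answer
  speculative_phrases.any (fun phrase => PySem.Str.isIn phrase answer_lower)

-- ===== PORT B =====
def bPhrases : List (List Char) :=
  ["generally".toList, "typically".toList, "probably".toList, "might".toList,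
   "could be".toList, "i think".toList, "based on my knowledge".toList]

-- Source B's 'for i in range(len(s))' loop: walk the positions left to right,
-- at each one testing s.startswith(p, i) for every phrase
def bScan : List Char → Bool
  | [] => false
  | c :: cs => bPhrases.any (fun p => p.isPrefixOf (c :: cs)) || bScan cs

def check_for_speculation_alt (answer : String) : Bool :=
  bScan (PySem.Chars.lower answer.toList)

-- ===== PRECONDITION & SPEC =====
-- On answers whose lowercased text contains "i think" but none of the other six phrases,
-- A returns false (its mixed-case phrase "I think" can never occur in a lowercased text)
-- while B returns true, the intended detection of first-person speculation.
def D_check_for_speculation (answer : String) : Prop :=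
  PySem.Str.isIn "i think" (PySem.Str.lower answer) = true ∧
  ∀ p ∈ (["generally", "typically", "probably", "might", "could be",
          "based on my knowledge"] : List String),
    PySem.Str.isIn p (PySem.Str.lower answer) = false
instance (answer : String) : Decidable (D_check_for_speculation answer) := by
  unfold D_check_for_speculation; infer_instance

def Spec_check_for_speculation (answer : String) (out : Bool) : Prop :=
  ¬ D_check_for_speculation answer → out = check_for_speculation_alt answer
instance (answer : String) (out : Bool) : Decidable (Spec_check_for_speculation answer out) := by
  unfold Spec_check_for_speculation; infer_instance

def pvDiffWitness_check_for_speculation : String := "I think so"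
def pvDiffWitnessOut_check_for_speculation : Bool × Bool := (false, true)

-- ===== CLAIM (what is proved, stated in full; the proofs are below) =====
def Claim_unchanged_check_for_speculation : Prop := ∀ (answer : String), Dom_check_for_speculation answer → Spec_check_for_speculation answer (check_for_speculation answer)
def Claim_changed_check_for_speculation : Prop := Dom_check_for_speculation (pvDiffWitness_check_for_speculation) ∧ D_check_for_speculation (pvDiffWitness_check_for_speculation) ∧ check_for_speculation (pvDiffWitness_check_for_speculation) = pvDiffWitnessOut_check_for_speculation.1 ∧ check_for_speculation_alt (pvDiffWitness_check_for_speculation) = pvDiffWitnessOut_check_for_speculation.2 ∧ pvDiffWitnessOut_check_for_speculation.1 ≠ pvDiffWitnessOut_check_for_speculation.2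
def Claim_exact_check_for_speculation : Prop := ∀ (answer : String), Dom_check_for_speculation answer → D_check_for_speculation answer → check_for_speculation answer ≠ check_for_speculation_alt answer

-- ===== LEMMAS AND PROOFS =====

-- A lowered character is never the uppercase 'I'.
theorem lowerChar_ne_I (c : Char) : PySem.Chars.lowerChar c ≠ 'I' := by
  unfold PySem.Chars.lowerChar
  by_cases hu : PySem.Chars.isupper c = true
  · rw [if_pos hu]
    simp only [PySem.Chars.isupper, Bool.and_eq_true, decide_eq_true_eq, Char.le_def,
      UInt32.le_iff_toNat_le] at hu
    have h1 : 65 ≤ c.toNat := hu.1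
    have h2 : c.toNat ≤ 90 := hu.2
    intro h
    have hv : Nat.isValidChar (c.toNat + 32) := by left; omega
    have ht := congrArg Char.toNat h
    rw [Char.toNat_ofNat, if_pos hv] at ht
    have : ('I'.toNat : Nat) = 73 := by decide
    omega
  · rw [if_neg hu]
    intro h
    subst h
    exact hu (by decide)

-- "I think" is never an infix of a lowered character list.
theorem I_think_not_infix (l : List Char) :
    ¬ ("I think".toList <:+: PySem.Chars.lower l) := by
  intro h
  have hmem : 'I' ∈ PySem.Chars.lower l := h.subset (by decide)
  simp only [PySem.Chars.lower, List.mem_map] at hmem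
  obtain ⟨c, -, hc⟩ := hmem
  exact lowerChar_ne_I c hc

-- bScan finds exactly the phrases occurring somewhere in the text.
theorem bScan_iff (l : List Char) : bScan l = true ↔ ∃ p ∈ bPhrases, p <:+: l := by
  induction l with
  | nil =>
    refine iff_of_false (by simp [bScan]) ?_
    rintro ⟨p, hp, hinf⟩
    have hnil : p = [] := List.sublist_nil.mp hinf.sublist
    subst hnil
    revert hp
    decide
  | cons c cs ih =>
    simp only [bScan, Bool.or_eq_true, List.any_eq_true, List.isPrefixOf_iff_prefix, ih]
    constructor
    · rintro (⟨p, hp, h⟩ | ⟨p, hp, h⟩)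
      · exact ⟨p, hp, h.isInfix⟩
      · exact ⟨p, hp, List.infix_cons h⟩
    · rintro ⟨p, hp, h⟩
      rcases List.infix_cons_iff.mp h with h' | h'
      · exact Or.inl ⟨p, hp, h'⟩
      · exact Or.inr ⟨p, hp, h'⟩

-- Outside D_, the seven-scan A and the single-scan B agree.
theorem agree_outside_D (answer : String) (hnD : ¬ D_check_for_speculation answer) :
    check_for_speculation answer = check_for_speculation_alt answer := by
  have hI := I_think_not_infix answer.toList
  by_cases hD6 : ∃ p ∈ (["generally", "typically", "probably", "might", "could be",
      "based on my knowledge"] : List String),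
      PySem.Str.isIn p (PySem.Str.lower answer) = true
  · -- some other phrase occurs: both sides are true
    obtain ⟨p, hp, hip⟩ := hD6
    have hA : check_for_speculation answer = true := by
      simp only [check_for_speculation, List.any_eq_true]
      refine ⟨p, ?_, hip⟩
      have hss : (["generally", "typically", "probably", "might", "could be",
          "based on my knowledge"] : List String) ⊆ speculative_phrases := by decide
      exact hss hp
    have hB : check_for_speculation_alt answer = true := by
      rw [show check_for_speculation_alt answer
            = bScan (PySem.Chars.lower answer.toList) from rfl, bScan_iff]
      refine ⟨p.toList, ?_, ?_⟩
      · simp only [List.mem_cons, List.not_mem_nil, or_false] at hp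
        rcases hp with rfl | rfl | rfl | rfl | rfl | rfl <;> decide
      · rw [PySem.Str.isIn_iff_infix] at hip
        simpa [PySem.Str.toList_lower] using hip
    rw [hA, hB]
  · -- no other phrase occurs; then "i think" cannot occur either (else D_ would hold)
    have hfalse : ∀ p ∈ (["generally", "typically", "probably", "might", "could be",
        "based on my knowledge"] : List String),
        PySem.Str.isIn p (PySem.Str.lower answer) = false := by
      intro p hp
      cases hq : PySem.Str.isIn p (PySem.Str.lower answer) with
      | false => rfl
      | true => exact absurd ⟨p, hp, hq⟩ hD6
    have hIth : PySem.Str.isIn "i think" (PySem.Str.lower answer) = false := by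
      cases hq : PySem.Str.isIn "i think" (PySem.Str.lower answer) with
      | false => rfl
      | true => exact absurd ⟨hq, hfalse⟩ hnD
    have hA : check_for_speculation answer = false := by
      rw [Bool.eq_false_iff]
      intro hA
      simp only [check_for_speculation, speculative_phrases, List.any_eq_true,
        List.mem_cons, List.not_mem_nil, or_false] at hA
      obtain ⟨p, hp, hip⟩ := hA
      rcases hp with rfl | rfl | rfl | rfl | rfl | rfl | rfl
      · exact Bool.noConfusion (hip.symm.trans (hfalse "generally" (by decide)))
      · exact Bool.noConfusion (hip.symm.trans (hfalse "typically" (by decide)))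
      · exact Bool.noConfusion (hip.symm.trans (hfalse "probably" (by decide)))
      · exact Bool.noConfusion (hip.symm.trans (hfalse "might" (by decide)))
      · exact Bool.noConfusion (hip.symm.trans (hfalse "could be" (by decide)))
      · rw [PySem.Str.isIn_iff_infix] at hip
        rw [show (PySem.Str.lower answer).toList = PySem.Chars.lower answer.toList by
          simp [PySem.Str.toList_lower]] at hip
        exact hI hip
      · exact Bool.noConfusion (hip.symm.trans (hfalse "based on my knowledge" (by decide)))
    have hB : check_for_speculation_alt answer = false := by
      rw [Bool.eq_false_iff]
      intro hB
      rw [show check_for_speculation_alt answer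
            = bScan (PySem.Chars.lower answer.toList) from rfl, bScan_iff] at hB
      obtain ⟨p, hp, hinf⟩ := hB
      simp only [bPhrases, List.mem_cons, List.not_mem_nil, or_false] at hp
      have conv : ∀ q : String, q.toList <:+: PySem.Chars.lower answer.toList →
          PySem.Str.isIn q (PySem.Str.lower answer) = true := by
        intro q hq
        rw [PySem.Str.isIn_iff_infix]
        rw [show (PySem.Str.lower answer).toList = PySem.Chars.lower answer.toList by
          simp [PySem.Str.toList_lower]]
        exact hq
      rcases hp with rfl | rfl | rfl | rfl | rfl | rfl | rfl
      · exact Bool.noConfusion ((conv "generally" hinf).symm.trans (hfalse "generally" (by decide)))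
      · exact Bool.noConfusion ((conv "typically" hinf).symm.trans (hfalse "typically" (by decide)))
      · exact Bool.noConfusion ((conv "probably" hinf).symm.trans (hfalse "probably" (by decide)))
      · exact Bool.noConfusion ((conv "might" hinf).symm.trans (hfalse "might" (by decide)))
      · exact Bool.noConfusion ((conv "could be" hinf).symm.trans (hfalse "could be" (by decide)))
      · exact Bool.noConfusion ((conv "i think" hinf).symm.trans hIth)
      · exact Bool.noConfusion ((conv "based on my knowledge" hinf).symm.trans (hfalse "based on my knowledge" (by decide)))
    rw [hA, hB]

theorem A_false_on_D (answer : String) (hD : D_check_for_speculation answer) :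
    check_for_speculation answer = false := by
  have hI := I_think_not_infix answer.toList
  rw [Bool.eq_false_iff]
  intro hA
  simp only [check_for_speculation, speculative_phrases, List.any_eq_true,
    List.mem_cons, List.not_mem_nil, or_false] at hA
  obtain ⟨p, hp, hip⟩ := hA
  rcases hp with rfl | rfl | rfl | rfl | rfl | rfl | rfl
  · exact Bool.noConfusion (hip.symm.trans (hD.2 "generally" (by decide)))
  · exact Bool.noConfusion (hip.symm.trans (hD.2 "typically" (by decide)))
  · exact Bool.noConfusion (hip.symm.trans (hD.2 "probably" (by decide)))
  · exact Bool.noConfusion (hip.symm.trans (hD.2 "might" (by decide)))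
  · exact Bool.noConfusion (hip.symm.trans (hD.2 "could be" (by decide)))
  · rw [PySem.Str.isIn_iff_infix] at hip
    rw [show (PySem.Str.lower answer).toList = PySem.Chars.lower answer.toList by
      simp [PySem.Str.toList_lower]] at hip
    exact hI hip
  · exact Bool.noConfusion (hip.symm.trans (hD.2 "based on my knowledge" (by decide)))

theorem B_true_on_D (answer : String) (hD : D_check_for_speculation answer) :
    check_for_speculation_alt answer = true := by
  rw [show check_for_speculation_alt answer = bScan (PySem.Chars.lower answer.toList) from rfl,
    bScan_iff]
  refine ⟨"i think".toList, by decide, ?_⟩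
  have h := hD.1
  rw [PySem.Str.isIn_iff_infix] at h
  simpa [PySem.Str.toList_lower] using h

-- ===== VERDICT (by name: the statement is the Claim_ definition above) =====
theorem check_for_speculation_spec : Claim_unchanged_check_for_speculation := by
  intro answer _ hnD
  exact agree_outside_D answer hnD

theorem check_for_speculation_changed : Claim_changed_check_for_speculation := by
  unfold Claim_changed_check_for_speculation; decide

theorem check_for_speculation_tight : Claim_exact_check_for_speculation := by
  intro answer _ hD
  rw [A_false_on_D answer hD, B_true_on_D answer hD]
  decide
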